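-- pv_equiv track=rewrite | github.com/docomomobr/anais | regionais/sul/sdsul07/split_pdf.py | calculate_end_pages
-- ===== SOURCE A (Python) =====
-- LAST_CONTENT_PAGE = 499
--
-- def calculate_end_pages(articles):
--     """Calculate end page for each article based on next article's start page."""
--     result = []
--     for i, (section, start, title, authors_str) in enumerate(articles):
--         if i + 1 < len(articles):
--             next_start = articles[i + 1][1]
--             end_page = next_start - 1
--         else:
--             end_page = LAST_CONTENT_PAGE
--         result.append((section, start, end_page, title, authors_str))
--     return result
-- ===== SOURCE B (Python) =====
-- LAST_CONTENT_PAGE = 499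
--
-- def calculate_end_pages(articles):
--     """Calculate end page for each article based on next article's start page."""
--     result = []
--     next_start = LAST_CONTENT_PAGE + 1
--     for section, start, title, authors_str in reversed(articles):
--         result.append((section, start, next_start - 1, title, authors_str))
--         next_start = start
--     result.reverse()
--     return result
-- ===== Notes on version B (the rewrite author's own statement) =====
-- stated objective: alternative
-- what changed: Replaces A's forward loop with index lookahead (articles[i+1]) by a right-to-left single pass that carries the next article's start page as an accumulator, building the result back-to-front and reversing it; no indexing at all.
import Mathlib
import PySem

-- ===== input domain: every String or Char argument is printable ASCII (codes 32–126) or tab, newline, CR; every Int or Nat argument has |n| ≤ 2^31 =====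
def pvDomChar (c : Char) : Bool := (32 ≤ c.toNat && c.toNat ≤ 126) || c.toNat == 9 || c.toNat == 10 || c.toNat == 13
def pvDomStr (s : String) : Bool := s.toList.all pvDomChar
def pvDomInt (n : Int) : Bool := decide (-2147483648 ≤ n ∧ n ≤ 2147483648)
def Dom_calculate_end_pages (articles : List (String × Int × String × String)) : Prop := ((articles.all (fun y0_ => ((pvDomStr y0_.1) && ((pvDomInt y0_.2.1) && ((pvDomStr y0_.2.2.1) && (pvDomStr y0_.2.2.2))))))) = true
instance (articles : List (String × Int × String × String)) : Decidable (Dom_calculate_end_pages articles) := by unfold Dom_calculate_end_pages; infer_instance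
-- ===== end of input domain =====

-- B replaces A's forward lookahead loop by a right-to-left pass carrying the next start page; same result, same cost.

-- ===== PORT A =====
def calculate_end_pages (articles : List (String × Int × String × String)) : List (String × Int × Int × String × String) :=
  (PySem.List.enumerate articles).foldl (fun result x =>
    let i := x.1
    let end_page : Int :=
      if i + 1 < (articles.length : Int) then
        -- articles[i+1][1] - 1 ; the guard makes the lookup succeed, so the default is unreachable
        match PySem.List.pyGet? articles (i + 1) with
        | some nxt => nxt.2.1 - 1
        | none => 0
      else 499
    result ++ [(x.2.1, x.2.2.1, end_page, x.2.2.2.1, x.2.2.2.2)]) []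

-- ===== PORT B =====
-- reversed(articles) → articles.reverse; the loop threads (result, next_start); result.reverse() at the end
def calculate_end_pages_alt (articles : List (String × Int × String × String)) : List (String × Int × Int × String × String) :=
  let st := articles.reverse.foldl
    (fun (st : List (String × Int × Int × String × String) × Int) a =>
      (st.1 ++ [(a.1, a.2.1, st.2 - 1, a.2.2.1, a.2.2.2)], a.2.1))
    ([], 499 + 1)
  st.1.reverse

-- ===== PRECONDITION & SPEC =====
def Spec_calculate_end_pages (articles : List (String × Int × String × String)) (out : List (String × Int × Int × String × String)) : Prop := out = calculate_end_pages_alt articles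
instance (articles : List (String × Int × String × String)) (out : List (String × Int × Int × String × String)) : Decidable (Spec_calculate_end_pages articles out) := by unfold Spec_calculate_end_pages; infer_instance

-- ===== CLAIM (what is proved, stated in full; the proofs are below) =====
def Claim_equal_calculate_end_pages : Prop := ∀ (articles : List (String × Int × String × String)), Dom_calculate_end_pages articles → Spec_calculate_end_pages articles (calculate_end_pages articles)

-- ===== LEMMAS AND PROOFS =====

-- reference spec with an explicit sentinel s: forward list with each entry paired with its successor's start
def pvGo : List (String × Int × String × String) → Int → List (String × Int × Int × String × String)
  | [], _ => []
  | [a], s => [(a.1, a.2.1, s - 1, a.2.2.1, a.2.2.2)]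
  | a :: b :: t, s => (a.1, a.2.1, b.2.1 - 1, a.2.2.1, a.2.2.2) :: pvGo (b :: t) s

-- the list B's fold builds (before the final reverse), on an arbitrary input order
def pvHH : List (String × Int × String × String) → Int → List (String × Int × Int × String × String)
  | [], _ => []
  | a :: t, s => (a.1, a.2.1, s - 1, a.2.2.1, a.2.2.2) :: pvHH t a.2.1

def pvFS : List (String × Int × String × String) → Int → Int
  | [], s => s
  | a :: t, _ => pvFS t a.2.1

lemma pvGo_length (s : Int) : ∀ xs : List (String × Int × String × String), (pvGo xs s).length = xs.length := by
  intro xs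
  induction xs with
  | nil => simp [pvGo]
  | cons a t ih =>
    cases t with
    | nil => simp [pvGo]
    | cons b t' => simp [pvGo]; simpa [pvGo] using ih

lemma pvGo_getElem (s : Int) :
    ∀ (xs : List (String × Int × String × String)) (k : Nat) (hk : k < xs.length)
      (hk' : k < (pvGo xs s).length),
      (pvGo xs s)[k] =
        ((xs[k]).1, (xs[k]).2.1,
          (if h : k + 1 < xs.length then (xs[k+1]).2.1 else s) - 1,
          (xs[k]).2.2.1, (xs[k]).2.2.2) := by
  intro xs
  induction xs with
  | nil => intro k hk; simp at hk
  | cons a t ih =>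
    intro k hk hk'
    cases t with
    | nil =>
      have hk0 : k = 0 := by simp at hk; omega
      subst hk0; simp [pvGo]
    | cons b t' =>
      cases k with
      | zero => simp [pvGo]
      | succ n =>
        have h1 : n < (b :: t').length := by simpa using hk
        have h2 : n < (pvGo (b :: t') s).length := by rw [pvGo_length]; exact h1
        have := ih n h1 h2
        simp only [pvGo, List.getElem_cons_succ]
        rw [this]
        by_cases hc : n + 1 < (b :: t').length
        · have hc' : n + 1 + 1 < (a :: b :: t').length := by simpa using Nat.succ_lt_succ hc
          simp
        · have hc' : ¬ (n + 1 + 1 < (a :: b :: t').length) := by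
            simp only [List.length_cons] at hc ⊢; omega
          simp

lemma foldl_append_singleton {α β : Type} (f : α → β) :
    ∀ (l : List α) (acc : List β),
      l.foldl (fun r x => r ++ [f x]) acc = acc ++ l.map f := by
  intro l
  induction l with
  | nil => simp
  | cons a t ih => intro acc; simp [List.foldl, ih]

lemma calcA_eq_pvGo (articles : List (String × Int × String × String)) :
    calculate_end_pages articles = pvGo articles 500 := by
  unfold calculate_end_pages
  rw [foldl_append_singleton]
  apply List.ext_getElem
  · simp [PySem.List.length_enumerate, pvGo_length]
  · intro k h1 h2
    have hk : k < articles.length := by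
      simpa [PySem.List.length_enumerate] using h1
    simp only [List.nil_append, List.getElem_map, PySem.List.getElem_enumerate]
    rw [pvGo_getElem 500 articles k hk h2]
    by_cases hlt : k + 1 < articles.length
    · have hcast : ((k : Int)) + 1 < (articles.length : Int) := by omega
      have hget : PySem.List.pyGet? articles ((k : Int) + 1)
          = some articles[k + 1] := by
        have : ((k : Int)) + 1 = ((k + 1 : Nat) : Int) := by push_cast; ring
        rw [this, PySem.List.pyGet?_natCast, List.getElem?_eq_getElem hlt]
      simp [hcast, hget, hlt]
    · have hcast : ¬ (((k : Int)) + 1 < (articles.length : Int)) := by omega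
      simp [hcast, hlt]

lemma foldl_char :
    ∀ (ys : List (String × Int × String × String))
      (acc : List (String × Int × Int × String × String)) (s : Int),
      ys.foldl
        (fun (st : List (String × Int × Int × String × String) × Int) a =>
          (st.1 ++ [(a.1, a.2.1, st.2 - 1, a.2.2.1, a.2.2.2)], a.2.1)) (acc, s)
        = (acc ++ pvHH ys s, pvFS ys s) := by
  intro ys
  induction ys with
  | nil => intro acc s; simp [pvHH, pvFS]
  | cons a t ih =>
    intro acc s
    simp only [List.foldl_cons, ih, pvHH, pvFS, List.append_assoc, List.singleton_append]

lemma pvGo_append (a : String × Int × String × String) (s : Int) :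
    ∀ zs : List (String × Int × String × String),
      pvGo (zs ++ [a]) s = pvGo zs a.2.1 ++ [(a.1, a.2.1, s - 1, a.2.2.1, a.2.2.2)] := by
  intro zs
  induction zs with
  | nil => simp [pvGo]
  | cons c zs' ih =>
    cases zs' with
    | nil => simp [pvGo]
    | cons d t => simpa [pvGo] using ih

lemma pvHH_reverse :
    ∀ (ys : List (String × Int × String × String)) (s : Int),
      pvHH ys.reverse s = (pvGo ys s).reverse := by
  intro ys
  induction ys using List.reverseRecOn with
  | nil => intro s; simp [pvHH, pvGo]
  | append_singleton zs a ih =>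
    intro s
    rw [List.reverse_append]
    simp only [List.reverse_singleton, List.singleton_append, pvHH]
    rw [ih, pvGo_append, List.reverse_append]
    simp

lemma calcB_eq_pvGo (articles : List (String × Int × String × String)) :
    calculate_end_pages_alt articles = pvGo articles 500 := by
  unfold calculate_end_pages_alt
  rw [foldl_char]
  simp only [List.nil_append]
  have : (499 : Int) + 1 = 500 := by norm_num
  rw [this, pvHH_reverse, List.reverse_reverse]

-- ===== VERDICT (by name: the statement is the Claim_ definition above) =====
theorem calculate_end_pages_spec : Claim_equal_calculate_end_pages := by
  intro articles _
  unfold Spec_calculate_end_pages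
  rw [calcA_eq_pvGo, calcB_eq_pvGo]
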